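-- pv_equiv track=rewrite | github.com/pbparthas/Enki | src/enki/orch/bugs.py | derive_project_prefix
-- ===== SOURCE A (Python) =====
-- def derive_project_prefix(project: str) -> str:
--     """Derive human-readable prefix from project name."""
--     raw = (project or "").strip()
--     if not raw:
--         return "ENKI"
--     parts = [part for part in raw.replace("_", "-").split("-") if part]
--     if not parts:
--         return "ENKI"
--     initials = "".join(part[0].upper() for part in parts if part and part[0].isalnum())
--     if not initials:
--         return "ENKI"
--     if len(parts) == 1 and len(initials) == 1 and len(parts[0]) > 1:
--         initials = parts[0][:2].upper()
--     return initials[:4]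
-- ===== SOURCE B (Python) =====
-- def derive_project_prefix(project: str) -> str:
--     """Derive human-readable prefix from project name (single adjacent-pair scan, no split)."""
--     raw = (project or "").strip()
--     s = raw.replace("_", "-")
--     # a token starts exactly where a non-separator char follows a separator (with an imaginary one prepended)
--     starts = [c for p, c in zip("-" + s, s) if c != "-" and p == "-"]
--     if not starts:
--         return "ENKI"
--     initials = "".join(c.upper() for c in starts if c.isalnum())
--     if not initials:
--         return "ENKI"
--     if len(starts) == 1:
--         tok = s.strip("-")  # the unique token
--         if len(tok) > 1:
--             return tok[:2].upper()
--     return initials[:4]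
-- ===== Notes on version B (the rewrite author's own statement) =====
-- stated objective: alternative
-- what changed: Replaces the split-into-parts-list pipeline by a single adjacent-pair scan (zip of the string with itself shifted by one) that collects exactly the token-start characters, and recovers the unique token in the single-token case by stripping separator characters from both ends instead of indexing into a parts list.
import Mathlib
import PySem

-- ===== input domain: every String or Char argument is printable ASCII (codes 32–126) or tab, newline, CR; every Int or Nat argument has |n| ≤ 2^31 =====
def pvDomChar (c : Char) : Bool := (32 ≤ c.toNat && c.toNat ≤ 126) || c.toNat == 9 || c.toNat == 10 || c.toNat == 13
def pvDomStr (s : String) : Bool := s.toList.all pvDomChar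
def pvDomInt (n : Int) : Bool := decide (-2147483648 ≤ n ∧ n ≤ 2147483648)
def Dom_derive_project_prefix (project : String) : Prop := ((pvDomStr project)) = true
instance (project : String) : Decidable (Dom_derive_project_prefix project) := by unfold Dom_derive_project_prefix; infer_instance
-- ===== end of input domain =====

-- B replaces A's split-into-parts pipeline by one adjacent-pair scan collecting token-start
-- characters, recovering the unique token (single-token case) by stripping '-' at both ends:
-- an alternative decomposition of the same O(n) task, proven to return the same string.

-- ===== PORT A =====
def derive_project_prefix (project : String) : String :=
  let raw := PySem.Chars.strip project.toList
  if raw = [] then "ENKI" else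
  let parts := (PySem.Chars.splitOn (PySem.Chars.replace raw ['_'] ['-']) ['-']).filter (fun p => p ≠ [])
  if parts = [] then "ENKI" else
  let initials := PySem.Chars.join [] (parts.filterMap (fun part =>
      match part with
      | [] => none                      -- 'if part' guard of the generator
      | c :: _ => if PySem.Chars.isalnum c then some (PySem.Chars.upper [c]) else none))
  if initials = [] then "ENKI" else
  if parts.length == 1 && initials.length == 1 && decide (1 < (parts.headD []).length) then
    String.ofList (PySem.Chars.upper (PySem.Chars.slice (parts.headD []) none (some 2)))
  else String.ofList (PySem.Chars.slice initials none (some 4))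

-- ===== PORT B =====
def derive_project_prefix_alt (project : String) : String :=
  let s := PySem.Chars.replace (PySem.Chars.strip project.toList) ['_'] ['-']
  let starts := (List.zip ('-' :: s) s).filterMap (fun pc =>
      if pc.2 ≠ '-' ∧ pc.1 = '-' then some pc.2 else none)
  if starts = [] then "ENKI" else
  let initials := PySem.Chars.join [] (starts.filterMap (fun c =>
      if PySem.Chars.isalnum c then some (PySem.Chars.upper [c]) else none))
  if initials = [] then "ENKI" else
  if starts.length == 1 then
    let tok := PySem.Chars.stripChars s ['-']
    if decide (1 < tok.length) then String.ofList (PySem.Chars.upper (PySem.Chars.slice tok none (some 2)))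
    else String.ofList (PySem.Chars.slice initials none (some 4))
  else String.ofList (PySem.Chars.slice initials none (some 4))

-- ===== PRECONDITION & SPEC =====
def Spec_derive_project_prefix (project : String) (out : String) : Prop := out = derive_project_prefix_alt project
instance (project : String) (out : String) : Decidable (Spec_derive_project_prefix project out) := by unfold Spec_derive_project_prefix; infer_instance

-- ===== CLAIM (what is proved, stated in full; the proofs are below) =====
def Claim_equal_derive_project_prefix : Prop := ∀ (project : String), Dom_derive_project_prefix project → Spec_derive_project_prefix project (derive_project_prefix project)

-- ===== LEMMAS AND PROOFS =====
def pvSplit : List Char → List (List Char)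
  | [] => [[]]
  | c :: rest => if c = '-' then [] :: pvSplit rest
      else match pvSplit rest with
        | [] => [[c]]
        | h :: t => (c :: h) :: t

theorem pvSplit_ne_nil (sl : List Char) : pvSplit sl ≠ [] := by
  cases sl with
  | nil => simp [pvSplit]
  | cons c rest =>
    simp only [pvSplit]
    split_ifs
    · simp
    · cases h : pvSplit rest <;> simp

theorem go_eq (l : List Char) : ∀ (fuel : Nat) (cur : List Char) (acc : List (List Char)),
    l.length ≤ fuel →
    PySem.Chars.splitOn.go ['-'] fuel l cur acc
      = acc.reverse ++ (cur.reverse ++ (pvSplit l).headI) :: (pvSplit l).tail := by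
  induction l with
  | nil =>
    intro fuel cur acc _
    cases fuel <;> simp [PySem.Chars.splitOn.go, pvSplit]
  | cons c rest ih =>
    intro fuel cur acc hle
    cases fuel with
    | zero => simp at hle
    | succ f =>
      simp only [PySem.Chars.splitOn.go]
      by_cases hc : c = '-'
      · have hp : List.isPrefixOf ['-'] (c :: rest) = true := by simp [List.isPrefixOf, hc]
        rw [if_pos hp]
        have := ih f [] (cur.reverse :: acc) (by simpa using Nat.lt_succ_iff.mp (by simpa using hle))
        simp only [List.length_singleton, List.drop_one, List.tail_cons] at this ⊢
        rw [this]
        simp [pvSplit, hc]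
        cases h : pvSplit rest with
        | nil => exact absurd h (pvSplit_ne_nil rest)
        | cons h0 t => simp [List.headI]
      · have hp : List.isPrefixOf ['-'] (c :: rest) = false := by
          simp [List.isPrefixOf]; exact fun h => absurd h.symm hc
        rw [if_neg (by simp [hp])]
        have := ih f (c :: cur) acc (by simpa using Nat.lt_succ_iff.mp (by simpa using hle))
        rw [this]
        cases h : pvSplit rest with
        | nil => exact absurd h (pvSplit_ne_nil rest)
        | cons h0 t => simp [pvSplit, hc, h, List.headI]

theorem splitOn_eq (sl : List Char) : PySem.Chars.splitOn sl ['-'] = pvSplit sl := by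
  unfold PySem.Chars.splitOn
  rw [go_eq sl (sl.length + 1) [] [] (by omega)]
  cases h : pvSplit sl with
  | nil => exact absurd h (pvSplit_ne_nil sl)
  | cons h0 t => simp [List.headI]

theorem starts_eq (sl : List Char) : ∀ (p : Char),
    ((p :: sl).zip sl).filterMap (fun pc => if pc.2 ≠ '-' ∧ pc.1 = '-' then some pc.2 else none)
      = (if p = '-' then (pvSplit sl).filter (· ≠ []) else ((pvSplit sl).tail).filter (· ≠ [])).filterMap List.head? := by
  induction sl with
  | nil => intro p; simp [pvSplit]
  | cons c rest ih =>
    intro p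
    simp only [List.zip_cons_cons, List.filterMap_cons]
    by_cases hc : c = '-'
    · subst hc
      rw [if_neg (by simp)]
      rw [ih '-']
      by_cases hp : p = '-' <;> simp [hp, pvSplit]
    · by_cases hp : p = '-'
      · rw [if_pos (by simp [hc, hp])]
        rw [ih c]
        rw [if_neg hc, if_pos hp]
        cases h : pvSplit rest with
        | nil => exact absurd h (pvSplit_ne_nil rest)
        | cons h0 t => simp [pvSplit, hc, h]
      · rw [if_neg (by simp [hp])]
        rw [ih c, if_neg hc, if_neg hp]
        cases h : pvSplit rest with
        | nil => exact absurd h (pvSplit_ne_nil rest)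
        | cons h0 t => simp [pvSplit, hc, h]

theorem len_hds (L : List (List Char)) (h : ∀ x ∈ L, x ≠ []) :
    (L.filterMap List.head?).length = L.length := by
  induction L with
  | nil => rfl
  | cons x xs ih =>
    cases x with
    | nil => exact absurd rfl (h [] (by simp))
    | cons c t =>
      simp only [List.filterMap_cons, List.head?_cons, List.length_cons]
      rw [ih (fun y hy => h y (by simp [hy]))]

theorem filter_eq_single {α : Type} (L : List (List α)) (u : List α)
    (h : L.filter (· ≠ []) = [u]) :
    ∃ a b, L = List.replicate a ([] : List α) ++ u :: List.replicate b [] := by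
  induction L with
  | nil => simp at h
  | cons x xs ih =>
    by_cases hx : x = []
    · subst hx
      simp only [List.filter_cons, ne_eq, not_true_eq_false, decide_false] at h
      obtain ⟨a, b, hab⟩ := ih (by simpa using h)
      exact ⟨a + 1, b, by simp [hab, List.replicate_succ]⟩
    · have : x :: xs.filter (· ≠ []) = [u] := by
        simpa [List.filter_cons, hx] using h
      obtain ⟨hxu, hxs⟩ := by simpa using this
      refine ⟨0, xs.length, ?_⟩
      simp only [List.replicate, List.nil_append, hxu]
      congr 1
      exact List.eq_replicate_of_mem hxs

theorem noSep (sl : List Char) : ∀ x ∈ pvSplit sl, '-' ∉ x := by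
  induction sl with
  | nil => simp [pvSplit]
  | cons c rest ih =>
    intro x hx
    by_cases hc : c = '-'
    · simp only [pvSplit, if_pos hc, List.mem_cons] at hx
      rcases hx with h | h
      · simp [h]
      · exact ih x h
    · simp only [pvSplit, if_neg hc] at hx
      cases h : pvSplit rest with
      | nil => exact absurd h (pvSplit_ne_nil rest)
      | cons h0 t =>
        rw [h] at hx
        simp only [List.mem_cons] at hx
        rcases hx with h1 | h1
        · subst h1
          intro hm
          simp only [List.mem_cons] at hm
          rcases hm with h2 | h2
          · exact hc h2.symm
          · exact ih h0 (by simp [h]) h2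
        · exact ih x (by simp [h, h1])

theorem ic_cons_cons {α : Type} (sep x y : List α) (xs : List (List α)) :
    List.intercalate sep (x :: y :: xs) = x ++ sep ++ List.intercalate sep (y :: xs) := by
  simp [List.intercalate, List.intersperse]

theorem ic_single {α : Type} (sep x : List α) : List.intercalate sep [x] = x := by
  simp [List.intercalate, List.intersperse]

theorem intercalate_pvSplit (sl : List Char) : List.intercalate ['-'] (pvSplit sl) = sl := by
  induction sl with
  | nil => simp [pvSplit, List.intercalate]
  | cons c rest ih =>
    by_cases hc : c = '-'
    · rw [show pvSplit (c :: rest) = [] :: pvSplit rest by simp [pvSplit, hc]]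
      cases h : pvSplit rest with
      | nil => exact absurd h (pvSplit_ne_nil rest)
      | cons h0 t =>
        rw [h] at ih
        rw [ic_cons_cons, ih]
        simp [hc]
    · cases h : pvSplit rest with
      | nil => exact absurd h (pvSplit_ne_nil rest)
      | cons h0 t =>
        rw [show pvSplit (c :: rest) = (c :: h0) :: t by simp [pvSplit, hc, h]]
        rw [h] at ih
        cases t with
        | nil =>
          rw [ic_single] at ih ⊢
          simp [ih]
        | cons t0 ts =>
          rw [ic_cons_cons] at ih ⊢
          simp only [List.cons_append]
          rw [ih]

theorem ic_u_repl (u : List Char) (b : Nat) :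
    List.intercalate ['-'] (u :: List.replicate b []) = u ++ List.replicate b '-' := by
  induction b generalizing u with
  | zero => simp [ic_single]
  | succ b ih =>
    rw [List.replicate_succ, ic_cons_cons, ih []]
    simp [List.replicate_succ]

theorem ic_repl (a : Nat) (u : List Char) (b : Nat) :
    List.intercalate ['-'] (List.replicate a [] ++ u :: List.replicate b [])
      = List.replicate a '-' ++ u ++ List.replicate b '-' := by
  induction a with
  | zero => simpa using ic_u_repl u b
  | succ a ih =>
    rw [List.replicate_succ, List.cons_append]
    have hne : ∃ y ys, List.replicate a ([] : List Char) ++ u :: List.replicate b [] = y :: ys := by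
      cases a with
      | zero => exact ⟨u, List.replicate b [], by simp⟩
      | succ a => exact ⟨[], List.replicate a [] ++ u :: List.replicate b [], by simp [List.replicate_succ]⟩
    obtain ⟨y, ys, hy⟩ := hne
    rw [hy, ic_cons_cons]
    simp only [List.nil_append]
    rw [← hy, ih]
    simp [List.replicate_succ]

theorem dropWhile_repl_append (p : Char → Bool) (hp : p '-' = true) (a : Nat) (l : List Char) :
    List.dropWhile p (List.replicate a '-' ++ l) = List.dropWhile p l := by
  induction a with
  | zero => simp
  | succ a ih => simp [List.replicate_succ, hp, ih]

theorem dropWhile_of_head (p : Char → Bool) (c : Char) (l : List Char) (hc : p c = false) :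
    List.dropWhile p (c :: l) = c :: l := by
  simp [hc]

theorem strip_repl (a b : Nat) (u : List Char) (hu : u ≠ []) (hns : '-' ∉ u) :
    PySem.Chars.stripChars (List.replicate a '-' ++ u ++ List.replicate b '-') ['-'] = u := by
  simp only [PySem.Chars.stripChars]
  obtain ⟨c, u', rfl⟩ := List.exists_cons_of_ne_nil hu
  have hp : (fun c => List.contains ['-'] c) '-' = true := by simp
  have hcne : c ≠ '-' := by intro h; subst h; simp at hns
  have hc : List.contains ['-'] c = false := by
    simp only [List.contains_cons, List.contains_nil, Bool.or_false, beq_eq_false_iff_ne, ne_eq]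
    exact hcne
  rw [List.append_assoc, dropWhile_repl_append _ hp]
  rw [List.cons_append, dropWhile_of_head _ _ _ hc]
  rw [show (c :: (u' ++ List.replicate b '-')).reverse
        = List.replicate b '-' ++ (c :: u').reverse by simp]
  rw [dropWhile_repl_append _ hp]
  have hrev : (c :: u').reverse ≠ [] := by simp
  obtain ⟨d, l', hd⟩ := List.exists_cons_of_ne_nil hrev
  have hdm : d ∈ c :: u' := by
    have hmem : d ∈ (c :: u').reverse := by rw [hd]; simp
    exact List.mem_reverse.mp hmem
  have hdne : d ≠ '-' := fun h => hns (h ▸ hdm)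
  have hdc : List.contains ['-'] d = false := by
    simp only [List.contains_cons, List.contains_nil, Bool.or_false, beq_eq_false_iff_ne, ne_eq]
    exact hdne
  rw [hd, dropWhile_of_head _ _ _ hdc, ← hd]
  simp

theorem tok_eq (sl u : List Char) (h : (pvSplit sl).filter (fun p => p ≠ []) = [u]) :
    PySem.Chars.stripChars sl ['-'] = u := by
  have humem : u ∈ (pvSplit sl).filter (fun p => p ≠ []) := by rw [h]; simp
  have hu : u ≠ [] := by simpa using (List.mem_filter.mp humem).2
  have hns : '-' ∉ u := noSep sl u (List.mem_filter.mp humem).1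
  obtain ⟨a, b, hab⟩ := filter_eq_single (pvSplit sl) u h
  have hsl : sl = List.replicate a '-' ++ u ++ List.replicate b '-' := by
    rw [← intercalate_pvSplit sl, hab, ic_repl]
  rw [hsl, strip_repl a b u hu hns]

theorem join_nil_nil : PySem.Chars.join [] ([] : List (List Char)) = [] := by rfl

theorem join_nil_single (x : List Char) : PySem.Chars.join [] [x] = x := by
  simp [PySem.Chars.join, ic_single]

theorem main_eq (project : String) :
    derive_project_prefix project = derive_project_prefix_alt project := by
  simp only [derive_project_prefix, derive_project_prefix_alt]
  set raw := PySem.Chars.strip project.toList with hraw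
  by_cases h0 : raw = []
  · rw [if_pos h0, h0]
    have hrepl : PySem.Chars.replace [] ['_'] ['-'] = [] := by rfl
    simp [hrepl]
  · rw [if_neg h0]
    rw [splitOn_eq]
    rw [starts_eq (PySem.Chars.replace raw ['_'] ['-']) '-', if_pos rfl]
    set sl := PySem.Chars.replace raw ['_'] ['-'] with hsl
    set P := (pvSplit sl).filter (fun p => decide ¬p = []) with hP
    have hPne : ∀ x ∈ P, x ≠ [] := by
      intro x hx
      simpa using (List.mem_filter.mp hx).2
    have hlen : (P.filterMap List.head?).length = P.length := len_hds P hPne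
    have hIB : (P.filterMap List.head?).filterMap
          (fun c => if PySem.Chars.isalnum c then some (PySem.Chars.upper [c]) else none)
        = P.filterMap (fun part => match part with
            | [] => none
            | c :: _ => if PySem.Chars.isalnum c then some (PySem.Chars.upper [c]) else none) := by
      rw [List.filterMap_filterMap]
      congr 1
      funext x
      cases x <;> rfl
    rw [hIB]
    have hstarts_nil : (List.filterMap List.head? P = []) ↔ (P = []) := by
      rw [← List.length_eq_zero_iff, ← List.length_eq_zero_iff, hlen]
    by_cases hPnil : P = []
    · rw [if_pos hPnil, if_pos (hstarts_nil.mpr hPnil)]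
    · rw [if_neg hPnil, if_neg (fun h => hPnil (hstarts_nil.mp h))]
      set I := P.filterMap (fun part => match part with
            | [] => none
            | c :: _ => if PySem.Chars.isalnum c then some (PySem.Chars.upper [c]) else none) with hIdef
      by_cases hI : PySem.Chars.join [] I = []
      · rw [if_pos hI]
        rw [if_pos hI]
      · rw [if_neg hI]
        rw [if_neg hI]
        by_cases hl1 : P.length = 1
        · obtain ⟨u, hu⟩ := List.length_eq_one_iff.mp hl1
          have hune : u ≠ [] := hPne u (by rw [hu]; simp)
          obtain ⟨c, t, rfl⟩ := List.exists_cons_of_ne_nil hune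
          by_cases halnum : PySem.Chars.isalnum c = true
          · have hIu : I = [PySem.Chars.upper [c]] := by
              rw [hIdef, hu]
              simp [halnum]
            have hJlen : (PySem.Chars.join [] I).length = 1 := by
              rw [hIu, join_nil_single]
              rfl
            have hcondA : (P.length == 1 && (PySem.Chars.join [] I).length == 1
                && decide (1 < (P.headD []).length)) = decide (1 < (P.headD []).length) := by
              simp [hl1, hJlen]
            have hcondB : ((P.filterMap List.head?).length == 1) = true := by
              simp [hlen, hl1]
            have htok : PySem.Chars.stripChars sl ['-'] = c :: t := tok_eq sl (c :: t) hu
            have hhead : P.headD [] = c :: t := by rw [hu]; rfl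
            rw [hcondA, hcondB, htok, hhead]
            simp
          · exfalso
            apply hI
            have : I = [] := by
              rw [hIdef, hu]
              simp [halnum]
            rw [this, join_nil_nil]
        · have hcondA : (P.length == 1 && (PySem.Chars.join [] I).length == 1
              && decide (1 < (P.headD []).length)) = false := by
            simp [hl1]
          have hcondB : ((P.filterMap List.head?).length == 1) = false := by
            simp [hlen, hl1]
          rw [hcondA, hcondB]
          simp

-- ===== VERDICT (by name: the statement is the Claim_ definition above) =====
theorem derive_project_prefix_spec : Claim_equal_derive_project_prefix := by
  intro project _
  exact main_eq project
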